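-- pv_equiv track=rewrite | github.com/meng80-bb/topup2.0 | HttpBackend/steps/topup_step_v1/step1_1_first_job_submission.py | _find_smallest_unprocessed_date
-- ===== SOURCE A (Python) =====
-- from typing import Dict, Any, List, Optional, Tuple
--
-- def _find_smallest_unprocessed_date(
--     processed_dates: List[str],
--     all_dates: List[str]
-- ) -> Tuple[bool, Optional[str], str]:
--     """
--     找出最小的未处理日期
--
--     Args:
--         processed_dates: 已处理的日期列表
--         all_dates: 所有可用日期列表
--
--     Returns:
--         Tuple[是否成功, 选中的日期, 错误信息]
--     """
--     # 找出未处理的日期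
--     unprocessed_dates = [
--         date_item for date_item in all_dates
--         if date_item not in processed_dates
--     ]
--
--     if not unprocessed_dates:
--         return False, None, '没有找到未处理的日期'
--
--     # 选择最小的未处理日期
--     selected_date = min(unprocessed_dates)
--     return True, selected_date, ''
-- ===== SOURCE B (Python) =====
-- from typing import List, Optional, Tuple
--
-- def _find_smallest_unprocessed_date(
--     processed_dates: List[str],
--     all_dates: List[str]
-- ) -> Tuple[bool, Optional[str], str]:
--     # Sort ascending, then return on the first date not yet processed.
--     for date_item in sorted(all_dates):
--         if date_item not in processed_dates:
--             return True, date_item, ''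
--     return False, None, '没有找到未处理的日期'
-- ===== Notes on version B (the rewrite author's own statement) =====
-- stated objective: faster
-- what changed: Instead of filtering every unprocessed date into a list (a full processed_dates membership scan per date) and taking min(), B sorts all_dates ascending and returns at the first element not in processed_dates, so it usually performs only a few membership scans and builds no intermediate list.
import Mathlib
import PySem

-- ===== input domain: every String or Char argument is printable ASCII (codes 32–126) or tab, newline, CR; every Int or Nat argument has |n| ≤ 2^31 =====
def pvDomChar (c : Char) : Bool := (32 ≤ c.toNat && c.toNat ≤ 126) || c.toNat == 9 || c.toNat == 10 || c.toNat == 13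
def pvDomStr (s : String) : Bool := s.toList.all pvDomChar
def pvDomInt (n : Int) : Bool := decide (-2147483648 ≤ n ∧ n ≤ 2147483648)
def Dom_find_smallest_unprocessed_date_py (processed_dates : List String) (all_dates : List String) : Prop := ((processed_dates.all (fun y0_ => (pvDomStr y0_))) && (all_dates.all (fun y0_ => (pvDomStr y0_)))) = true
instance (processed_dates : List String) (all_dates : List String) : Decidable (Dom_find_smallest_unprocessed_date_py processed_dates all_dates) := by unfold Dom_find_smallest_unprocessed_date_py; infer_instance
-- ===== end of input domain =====

-- B sorts all_dates ascending and returns at the first unprocessed element, instead of filtering everything and taking min().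


-- ===== PORT A =====
-- filter the unprocessed dates, then min() of the filtered list (min? = none exactly when the list is empty, A's `if not unprocessed_dates` branch)
def find_smallest_unprocessed_date_py (processed_dates : List String) (all_dates : List String) : Bool × Option String × String :=
  let unprocessed_dates := all_dates.filter (fun date_item => !(processed_dates.contains date_item))
  match PySem.List.min? unprocessed_dates (fun x => x) with
  | none => (false, none, "没有找到未处理的日期")
  | some selected_date => (true, some selected_date, "")

-- ===== PORT B =====
-- sort ascending, return at the first element not in processed_dates
def find_smallest_unprocessed_date_py_alt (processed_dates : List String) (all_dates : List String) : Bool × Option String × String :=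
  match (PySem.List.sorted all_dates (fun x => x) false).find? (fun date_item => !(processed_dates.contains date_item)) with
  | some date_item => (true, some date_item, "")
  | none => (false, none, "没有找到未处理的日期")

-- ===== PRECONDITION & SPEC =====
def Spec_find_smallest_unprocessed_date_py (processed_dates : List String) (all_dates : List String) (out : Bool × Option String × String) : Prop := out = find_smallest_unprocessed_date_py_alt processed_dates all_dates
instance (processed_dates : List String) (all_dates : List String) (out : Bool × Option String × String) : Decidable (Spec_find_smallest_unprocessed_date_py processed_dates all_dates out) := by unfold Spec_find_smallest_unprocessed_date_py; infer_instance

-- ===== CLAIM (what is proved, stated in full; the proofs are below) =====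
def Claim_equal_find_smallest_unprocessed_date_py : Prop := ∀ (processed_dates : List String) (all_dates : List String), Dom_find_smallest_unprocessed_date_py processed_dates all_dates → Spec_find_smallest_unprocessed_date_py processed_dates all_dates (find_smallest_unprocessed_date_py processed_dates all_dates)

-- ===== LEMMAS AND PROOFS =====

-- in a ≤-sorted list, the first element satisfying p is ≤ every element satisfying p
theorem find?_sorted_isMin {p : String → Bool} {l : List String} {m : String}
    (hp : l.Pairwise (· ≤ ·)) (hf : l.find? p = some m) :
    ∀ x ∈ l, p x → m ≤ x := by
  induction l with
  | nil => simp at hf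
  | cons a t ih =>
    rcases List.pairwise_cons.mp hp with ⟨ha, ht⟩
    by_cases hpa : p a = true
    · rw [List.find?_cons_of_pos hpa] at hf
      cases hf
      intro x hx _
      rcases List.mem_cons.mp hx with rfl | hx
      · exact le_refl _
      · exact ha x hx
    · rw [List.find?_cons_of_neg (by simpa using hpa)] at hf
      intro x hx hpx
      rcases List.mem_cons.mp hx with rfl | hx
      · exact absurd hpx hpa
      · exact ih ht hf x hx hpx

theorem find_smallest_unprocessed_date_py_eq (processed_dates : List String) (all_dates : List String) :
    find_smallest_unprocessed_date_py processed_dates all_dates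
      = find_smallest_unprocessed_date_py_alt processed_dates all_dates := by
  unfold find_smallest_unprocessed_date_py find_smallest_unprocessed_date_py_alt
  set p : String → Bool := fun d => !(processed_dates.contains d) with hp
  set s := PySem.List.sorted all_dates (fun x => x) false with hs
  have hmem : ∀ x, x ∈ s ↔ x ∈ all_dates := fun x => PySem.List.mem_sorted all_dates (fun y => y) false x
  have hsorted : s.Pairwise (· ≤ ·) := PySem.List.sorted_pairwise all_dates (fun y => y)
  cases hfind : s.find? p with
  | none =>
    have hnone : ∀ x ∈ all_dates, ¬ p x = true := by
      intro x hx
      exact List.find?_eq_none.mp hfind x ((hmem x).mpr hx)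
    have hfilter : all_dates.filter p = [] :=
      List.filter_eq_nil_iff.mpr hnone
    rw [hfilter]
    simp [PySem.List.min?]
  | some m =>
    have hpm : p m = true := List.find?_some hfind
    have hms : m ∈ s := List.mem_of_find?_eq_some hfind
    have hmf : m ∈ all_dates.filter p :=
      List.mem_filter.mpr ⟨(hmem m).mp hms, hpm⟩
    cases hmin : PySem.List.min? (all_dates.filter p) (fun x => x) with
    | none =>
      rw [(PySem.List.min?_eq_none_iff _ _).mp hmin] at hmf
      exact absurd hmf (List.not_mem_nil)
    | some m0 =>
      have hm0f : m0 ∈ all_dates.filter p := PySem.List.min?_mem hmin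
      have hm0 : m0 ∈ all_dates := (List.mem_filter.mp hm0f).1
      have hpm0 : p m0 = true := (List.mem_filter.mp hm0f).2
      have h1 : m ≤ m0 := find?_sorted_isMin hsorted hfind m0 ((hmem m0).mpr hm0) hpm0
      have h2 : m0 ≤ m := PySem.List.min?_isMin hmin m hmf
      have hmm : m = m0 := le_antisymm h1 h2
      subst hmm
      simp [hmin]

-- ===== VERDICT (by name: the statement is the Claim_ definition above) =====
theorem find_smallest_unprocessed_date_py_spec : Claim_equal_find_smallest_unprocessed_date_py := by
  intro processed_dates all_dates _
  exact find_smallest_unprocessed_date_py_eq processed_dates all_dates
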